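-- pv_equiv track=rewrite | github.com/Jv131103/estudos_python | problemas/exercicio369.py | gerar_lista_alternada
-- ===== SOURCE A (Python) =====
-- def gerar_lista_alternada(limite):
--     lista_alternada = []
--     for valor in range(1, limite):
--         if valor & 1 == 0:
--             lista_alternada.append(-valor)
--         else:
--             lista_alternada.append(valor)
--     return lista_alternada
-- ===== SOURCE B (Python) =====
-- def gerar_lista_alternada(limite):
--     # build the full run first, then negate the even values (which sit at odd indices)
--     # with one strided slice assignment -- no per-element conditional.
--     lista = list(range(1, limite))
--     lista[1::2] = [-x for x in lista[1::2]]
--     return lista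
-- ===== Notes on version B (the rewrite author's own statement) =====
-- stated objective: alternative
-- what changed: Replaces the single loop that branches on each value's parity with a two-phase decomposition: build the whole list(range(1, limite)) first, then negate the even values in one strided slice assignment lista[1::2] = [-x for x in lista[1::2]].
import Mathlib
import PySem

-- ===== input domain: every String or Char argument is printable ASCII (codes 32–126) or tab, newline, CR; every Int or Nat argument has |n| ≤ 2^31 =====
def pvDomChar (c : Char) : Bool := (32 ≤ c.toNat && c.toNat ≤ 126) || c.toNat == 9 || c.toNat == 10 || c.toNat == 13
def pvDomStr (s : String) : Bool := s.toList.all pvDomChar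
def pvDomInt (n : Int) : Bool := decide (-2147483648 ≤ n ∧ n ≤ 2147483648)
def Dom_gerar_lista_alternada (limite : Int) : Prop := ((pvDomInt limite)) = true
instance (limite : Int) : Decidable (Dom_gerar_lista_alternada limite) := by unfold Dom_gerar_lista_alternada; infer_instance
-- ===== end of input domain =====

-- B builds list(range(1, limite)) first and then negates the entries at odd indices
-- (a strided slice assignment in Python); same return values as A, proved below.

-- ===== PORT A =====
def gerar_lista_alternada (limite : Int) : List Int :=
  (PySem.List.pyRange 1 limite 1).foldl
    (fun lista_alternada valor =>
      if valor.land 1 = 0 then lista_alternada ++ [-valor] else lista_alternada ++ [valor])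
    []

-- ===== PORT B =====
-- the strided slice assignment 'lista[1::2] = [-x for x in lista[1::2]]' is ported
-- exactly as negating the entries whose index is odd (that is what it does).
def gerar_lista_alternada_alt (limite : Int) : List Int :=
  let lista := PySem.List.pyRange 1 limite 1
  (PySem.List.enumerate lista 0).map (fun p => if p.1 % 2 = 1 then -p.2 else p.2)

-- ===== PRECONDITION & SPEC =====
def Spec_gerar_lista_alternada (limite : Int) (out : List Int) : Prop := out = gerar_lista_alternada_alt limite
instance (limite : Int) (out : List Int) : Decidable (Spec_gerar_lista_alternada limite out) := by unfold Spec_gerar_lista_alternada; infer_instance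

-- ===== CLAIM (what is proved, stated in full; the proofs are below) =====
def Claim_equal_gerar_lista_alternada : Prop := ∀ (limite : Int), Dom_gerar_lista_alternada limite → Spec_gerar_lista_alternada limite (gerar_lista_alternada limite)

-- ===== LEMMAS AND PROOFS =====

lemma foldA_eq_map (l : List Int) (acc : List Int) :
    l.foldl (fun a v => if v.land 1 = 0 then a ++ [-v] else a ++ [v]) acc
      = acc ++ l.map (fun v => if v.land 1 = 0 then -v else v) := by
  induction l generalizing acc with
  | nil => simp
  | cons x xs ih => by_cases h : x.land 1 = 0 <;> simp [h, ih, List.append_assoc]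

lemma land_one_succ (k : Nat) : Int.land ((1 : Int) + k) 1 = 0 ↔ (k : Int) % 2 = 1 := by
  have h : Int.land ((1 : Int) + k) 1 = ((Nat.land (1 + k) 1 : Nat) : Int) := by
    rw [show ((1 : Int) + k) = ((1 + k : Nat) : Int) by push_cast; ring]
    rfl
  rw [h, show Nat.land (1 + k) 1 = (1 + k) % 2 from Nat.and_one_is_mod _]
  omega

-- ===== VERDICT (by name: the statement is the Claim_ definition above) =====
theorem gerar_lista_alternada_spec : Claim_equal_gerar_lista_alternada := by
  intro limite _
  unfold Spec_gerar_lista_alternada gerar_lista_alternada gerar_lista_alternada_alt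
  rw [foldA_eq_map, PySem.List.pyRange_one]
  simp only [List.nil_append]
  apply List.ext_getElem
  · simp [PySem.List.length_enumerate]
  · intro k h1 h2
    simp only [List.getElem_map, List.getElem_range, PySem.List.getElem_enumerate] at *
    have hc : (Int.land (1 + (k : Int)) 1 = 0) ↔ ((0 : Int) + k) % 2 = 1 := by
      rw [land_one_succ]; omega
    rw [if_congr hc rfl rfl]
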